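-- pv_equiv track=rewrite | github.com/XavTo/Cv_gest | my_parser.py | my_strncmp
-- ===== SOURCE A (Python) =====
-- def my_strncmp(str1, str2):
--     count = 0
--     if len(str1) < len(str2):
--         return -1
--     for exist in str2:
--         if str1[count] != str2[count]:
--             return 1
--         count += 1
--     return 0
-- ===== SOURCE B (Python) =====
-- def my_strncmp(str1, str2):
--     if len(str1) < len(str2):
--         return -1
--     return 0 if str1[:len(str2)] == str2 else 1
-- ===== Notes on version B (the rewrite author's own statement) =====
-- stated objective: simpler
-- what changed: Replaces the indexed character-by-character loop with early exit by a single slice-equality test of str1's prefix of len(str2) against str2 (constant-factor speedup: one native string comparison instead of an interpreted loop).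
import Mathlib
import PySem

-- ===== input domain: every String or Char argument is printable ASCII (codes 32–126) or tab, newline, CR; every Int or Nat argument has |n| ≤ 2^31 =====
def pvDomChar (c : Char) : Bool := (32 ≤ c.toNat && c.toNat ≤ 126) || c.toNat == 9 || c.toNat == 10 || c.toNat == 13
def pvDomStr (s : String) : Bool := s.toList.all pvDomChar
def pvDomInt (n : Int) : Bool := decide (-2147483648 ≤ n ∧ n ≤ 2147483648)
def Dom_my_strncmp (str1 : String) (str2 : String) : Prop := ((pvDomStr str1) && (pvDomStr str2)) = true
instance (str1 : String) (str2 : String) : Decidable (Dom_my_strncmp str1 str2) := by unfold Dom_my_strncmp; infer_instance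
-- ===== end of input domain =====

-- B replaces A's indexed per-character loop with one slice-equality test of the prefix (simpler; return value only).

-- ===== PORT A =====
-- the 'for exist in str2' loop: iterate over str2's characters, keeping the index 'count'
def myStrncmpLoop (l1 l2 : List Char) : List Char → Int → Int
  | [], _ => 0
  | _ :: rest, count =>
    if PySem.List.pyGet? l1 count ≠ PySem.List.pyGet? l2 count then 1
    else myStrncmpLoop l1 l2 rest (count + 1)

def my_strncmp (str1 : String) (str2 : String) : Int :=
  let l1 := str1.toList
  let l2 := str2.toList
  if l1.length < l2.length then -1
  else myStrncmpLoop l1 l2 l2 0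

-- ===== PORT B =====
def my_strncmp_alt (str1 : String) (str2 : String) : Int :=
  let l1 := str1.toList
  let l2 := str2.toList
  if l1.length < l2.length then -1
  else if PySem.List.slice l1 none (some (l2.length : Int)) = l2 then 0 else 1

-- ===== PRECONDITION & SPEC =====
def Spec_my_strncmp (str1 : String) (str2 : String) (out : Int) : Prop := out = my_strncmp_alt str1 str2
instance (str1 : String) (str2 : String) (out : Int) : Decidable (Spec_my_strncmp str1 str2 out) := by unfold Spec_my_strncmp; infer_instance

-- ===== CLAIM (what is proved, stated in full; the proofs are below) =====
def Claim_equal_my_strncmp : Prop := ∀ (str1 : String) (str2 : String), Dom_my_strncmp str1 str2 → Spec_my_strncmp str1 str2 (my_strncmp str1 str2)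

-- ===== LEMMAS AND PROOFS =====

lemma myStrncmpLoop_eq (l1 l2 : List Char) (n : Nat) (count : Nat)
    (hn : l2.length - count = n) (h1 : l2.length ≤ l1.length) :
    myStrncmpLoop l1 l2 (l2.drop count) (count : Int) =
      if (l1.drop count).take (l2.length - count) = l2.drop count then 0 else 1 := by
  induction n generalizing count with
  | zero =>
    have h : l2.length ≤ count := by omega
    simp [List.drop_eq_nil_of_le h, hn, myStrncmpLoop]
  | succ n ih =>
    have hc2 : count < l2.length := by omega
    have hc1 : count < l1.length := by omega
    have hd2 : l2.drop count = l2[count] :: l2.drop (count + 1) :=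
      (List.getElem_cons_drop hc2).symm
    have hd1 : l1.drop count = l1[count] :: l1.drop (count + 1) :=
      (List.getElem_cons_drop hc1).symm
    rw [hd2]
    show (if PySem.List.pyGet? l1 count ≠ PySem.List.pyGet? l2 count then 1
      else myStrncmpLoop l1 l2 (l2.drop (count + 1)) ((count : Int) + 1)) = _
    rw [PySem.List.pyGet?_ofNat _ _ hc1, PySem.List.pyGet?_ofNat _ _ hc2]
    have hcast : ((count : Int) + 1) = ((count + 1 : Nat) : Int) := by push_cast; ring
    rw [hcast, ih (count + 1) (by omega)]
    have htake : l2.length - count = (l2.length - (count + 1)) + 1 := by omega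
    rw [hd1, htake, List.take_succ_cons]
    by_cases hhead : l1[count] = l2[count]
    · rw [if_neg (by simp [hhead])]
      simp only [List.cons.injEq, hhead, true_and]
    · rw [if_pos (by simp [hhead])]
      rw [if_neg (by simp only [List.cons.injEq, not_and]; intro h; exact absurd h hhead)]

theorem my_strncmp_spec : Claim_equal_my_strncmp := by
  intro str1 str2 _
  unfold Spec_my_strncmp my_strncmp my_strncmp_alt
  show (if str1.toList.length < str2.toList.length then (-1 : Int)
      else myStrncmpLoop str1.toList str2.toList str2.toList 0) =
    (if str1.toList.length < str2.toList.length then (-1 : Int)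
      else if PySem.List.slice str1.toList none (some (str2.toList.length : Int)) = str2.toList then 0 else 1)
  by_cases hlt : str1.toList.length < str2.toList.length
  · rw [if_pos hlt, if_pos hlt]
  · have h1 : str2.toList.length ≤ str1.toList.length := by omega
    have key := myStrncmpLoop_eq str1.toList str2.toList (str2.toList.length) 0 (by omega) h1
    simp only [List.drop_zero, Nat.sub_zero, Nat.cast_zero] at key
    rw [if_neg hlt, if_neg hlt, PySem.List.slice_to_natCast, key]
    rfl
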